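-- pv_equiv track=rewrite | github.com/Artenic-Ai/artenic_ai | packages/platform/providers/src/artenic_ai_platform_providers/hub/connectors/azure.py | _detect_gpu
-- ===== SOURCE A (Python) =====
-- _GPU_SIZES: dict[str, str] = {
--     "NC": "T4",
--     "ND": "A100",
--     "NV": "M60",
--     "NCas_T4": "T4",
--     "NCads_A100": "A100",
--     "NDs_A100": "A100",
--     "NDm_A100": "A100",
-- }
--
-- def _detect_gpu(vm_name: str) -> tuple[str | None, int]:
--     """Detect GPU type and count from Azure VM size name.
--
--     Azure GPU VM sizes follow the pattern ``Standard_N{family}...``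
--     (e.g. Standard_NC6, Standard_ND40rs_v2, Standard_NV12).
--     We extract the part after ``Standard_`` and check if it starts
--     with a known GPU family prefix.
--     """
--     parts = vm_name.split("_", 1)
--     # Expect "Standard_NC6" → ["Standard", "NC6"]
--     suffix = parts[1] if len(parts) == 2 else vm_name
--     suffix_upper = suffix.upper()
--     for prefix, gpu_type in _GPU_SIZES.items():
--         if suffix_upper.startswith(prefix.upper()):
--             return gpu_type, 1
--     return None, 0
-- ===== SOURCE B (Python) =====
-- _GPU_BY_PREFIX = {"NC": "T4", "ND": "A100", "NV": "M60"}
--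
--
-- def _detect_gpu(vm_name: str) -> tuple:
--     """Classify by the first two characters after the first '_' (or of the
--     whole name when there is no '_'): one 3-entry lookup, no scan over keys."""
--     _, sep, rest = vm_name.partition("_")
--     suffix = rest if sep else vm_name
--     gpu = _GPU_BY_PREFIX.get(suffix[:2].upper())
--     return (gpu, 1) if gpu is not None else (None, 0)
-- ===== Notes on version B (the rewrite author's own statement) =====
-- stated objective: simpler
-- what changed: Replaces the linear scan over the seven-key _GPU_SIZES dict (uppercasing each key and testing startswith) by str.partition plus one constant-time lookup of the first two uppercased suffix characters in a 3-entry map, since the four longer keys are subsumed by the NC/ND prefixes checked first.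
import Mathlib
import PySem

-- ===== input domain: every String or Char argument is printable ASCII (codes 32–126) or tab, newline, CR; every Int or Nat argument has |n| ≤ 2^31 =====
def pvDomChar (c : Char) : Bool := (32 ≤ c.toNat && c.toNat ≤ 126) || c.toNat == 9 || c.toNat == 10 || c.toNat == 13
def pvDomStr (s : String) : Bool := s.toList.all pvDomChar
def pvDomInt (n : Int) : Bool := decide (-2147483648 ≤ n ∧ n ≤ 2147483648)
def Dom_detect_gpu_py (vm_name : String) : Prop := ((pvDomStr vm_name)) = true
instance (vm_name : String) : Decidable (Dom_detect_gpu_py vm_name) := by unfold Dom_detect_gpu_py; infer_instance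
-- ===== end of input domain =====

-- B replaces A's scan over the seven dict keys by a single 3-entry lookup keyed on the first two
-- uppercased characters after the first '_' (the longer keys are subsumed by NC/ND): simpler, no loop.

-- ===== PORT A =====
def pvGpuSizes : PySem.Dict String String :=
  PySem.Dict.ofList
    [("NC", "T4"), ("ND", "A100"), ("NV", "M60"),
     ("NCas_T4", "T4"), ("NCads_A100", "A100"), ("NDs_A100", "A100"), ("NDm_A100", "A100")]

-- the for-loop over _GPU_SIZES.items()
def pvDetectLoop : List (String × String) → String → Option String × Int
  | [], _ => (none, 0)
  | (pre, gpu) :: rest, su =>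
      if PySem.Str.startswith su (PySem.Str.upper pre) then (some gpu, 1) else pvDetectLoop rest su

def detect_gpu_py (vm_name : String) : Option String × Int :=
  let parts := (PySem.Str.splitMax? vm_name "_" 1).getD []
  let suffix := if parts.length = 2 then parts.getD 1 vm_name else vm_name
  let suffix_upper := PySem.Str.upper suffix
  pvDetectLoop pvGpuSizes.items suffix_upper

-- ===== PORT B =====
def pvGpuByPrefix : PySem.Dict String String :=
  PySem.Dict.ofList [("NC", "T4"), ("ND", "A100"), ("NV", "M60")]

-- hand port of vm_name.partition("_") restricted to what B uses: the part after the
-- first '_' (none when '_' is absent); exact for the one-character separator.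
def pvAfterUnderscore : List Char → Option (List Char)
  | [] => none
  | c :: rest => if c = '_' then some rest else pvAfterUnderscore rest

def detect_gpu_py_alt (vm_name : String) : Option String × Int :=
  let suffix := (pvAfterUnderscore vm_name.toList).getD vm_name.toList
  let key := String.ofList (PySem.Chars.upper (suffix.take 2))
  match pvGpuByPrefix.get? key with
  | some gpu => (some gpu, 1)
  | none => (none, 0)

-- ===== PRECONDITION & SPEC =====
def Spec_detect_gpu_py (vm_name : String) (out : Option String × Int) : Prop := out = detect_gpu_py_alt vm_name
instance (vm_name : String) (out : Option String × Int) : Decidable (Spec_detect_gpu_py vm_name out) := by unfold Spec_detect_gpu_py; infer_instance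

-- ===== CLAIM (what is proved, stated in full; the proofs are below) =====
def Claim_equal_detect_gpu_py : Prop := ∀ (vm_name : String), Dom_detect_gpu_py vm_name → Spec_detect_gpu_py vm_name (detect_gpu_py vm_name)

-- ===== LEMMAS AND PROOFS =====

-- the split loop with maxsplit exhausted just flushes the rest of the string
lemma pv_go_zero (fuel : Nat) (l cur : List Char) (acc : List (List Char)) :
    PySem.Chars.splitOnMax.go ['_'] fuel 0 l cur acc = ((cur.reverse ++ l) :: acc).reverse := by
  cases fuel with
  | zero => rw [PySem.Chars.splitOnMax.go]
  | succ n => cases l with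
    | nil => rw [PySem.Chars.splitOnMax.go] <;> simp
    | cons c r => rw [PySem.Chars.splitOnMax.go] <;> simp

-- split("_", 1) characterised by the first underscore
lemma pv_go_one (l : List Char) (fuel : Nat) (cur : List Char) (acc : List (List Char))
    (h : l.length ≤ fuel) :
    PySem.Chars.splitOnMax.go ['_'] fuel 1 l cur acc =
      match pvAfterUnderscore l with
      | none => ((cur.reverse ++ l) :: acc).reverse
      | some rest => acc.reverse ++ [cur.reverse ++ l.takeWhile (fun c => !(c == '_')), rest] := by
  induction l generalizing fuel cur acc with
  | nil =>
      cases fuel with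
      | zero => rw [PySem.Chars.splitOnMax.go] <;> simp [pvAfterUnderscore]
      | succ n => rw [PySem.Chars.splitOnMax.go] <;> simp [pvAfterUnderscore]
  | cons c r ih =>
      cases fuel with
      | zero => simp at h
      | succ n =>
          rw [PySem.Chars.splitOnMax.go]
          by_cases hc : c = '_'
          · subst hc
            simp [List.isPrefixOf, pvAfterUnderscore, pv_go_zero, List.takeWhile]
          · have hbc : ('_' == c) = false := beq_eq_false_iff_ne.mpr (fun e => hc e.symm)
            simp only [List.isPrefixOf, hbc, Bool.false_and, Bool.false_eq_true, if_false,
              if_neg (show ¬ ((1 : Nat) = 0) from by omega)]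
            rw [ih n (c :: cur) acc (by simpa using Nat.le_of_succ_le_succ h)]
            cases hrest : pvAfterUnderscore r with
            | none => simp [pvAfterUnderscore, hc, hrest]
            | some rest =>
                simp [pvAfterUnderscore, hc, hrest, List.takeWhile, beq_eq_false_iff_ne.mpr hc]

lemma pv_split_eq (s : String) :
    (PySem.Str.splitMax? s "_" 1).getD [] =
      match pvAfterUnderscore s.toList with
      | none => [String.ofList s.toList]
      | some rest =>
          [String.ofList (s.toList.takeWhile (fun c => !(c == '_'))), String.ofList rest] := by
  have h1 : ("_" : String).toList = ['_'] := by decide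
  rw [PySem.Str.splitMax?, h1, PySem.Chars.splitMax?]
  have h2 : (['_'] : List Char).isEmpty = false := by decide
  rw [h2]
  simp only [Bool.false_eq_true, if_false]
  rw [PySem.Chars.splitOnMax]
  rw [if_neg (show ¬ ((1 : Int) < 0) from by decide)]
  rw [show (1 : Int).toNat = 1 from rfl]
  rw [pv_go_one _ _ _ _ (by omega)]
  cases h : pvAfterUnderscore s.toList with
  | none => simp
  | some rest => simp

lemma pv_sw2 (x y n c : Char) (s : List Char) :
    PySem.Chars.startswith (x::y::s) [n, c] = (n == x && c == y) := by
  simp [PySem.Chars.startswith, List.isPrefixOf]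

lemma pv_startswith_mono (s p q : List Char) (h : PySem.Chars.startswith s (p ++ q) = true) :
    PySem.Chars.startswith s p = true := by
  rw [PySem.Chars.startswith_iff] at h ⊢
  exact (List.prefix_append p q).trans h

lemma pv_beq_ofList (t : String) (l : List Char) : (t == String.ofList l) = (t.toList == l) := by
  by_cases h : t.toList = l
  · have ht : t = String.ofList l := by rw [← h, String.ofList_toList]
    simp [ht]
  · have ht : t ≠ String.ofList l := fun e => h (by rw [e, String.toList_ofList])
    simp [ht, h]

lemma pv_loop_eq_lookup (su : String) :
    pvDetectLoop pvGpuSizes.items (PySem.Str.upper su) =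
      (match pvGpuByPrefix.get? (String.ofList (PySem.Chars.upper (su.toList.take 2))) with
       | some gpu => (some gpu, 1)
       | none => (none, 0)) := by
  have hitems : pvGpuSizes.items =
    [("NC", "T4"), ("ND", "A100"), ("NV", "M60"),
     ("NCas_T4", "T4"), ("NCads_A100", "A100"), ("NDs_A100", "A100"), ("NDm_A100", "A100")] := by decide
  have hB : pvGpuByPrefix.items = [("NC", "T4"), ("ND", "A100"), ("NV", "M60")] := by decide
  rw [hitems]
  simp only [pvDetectLoop, PySem.Str.startswith_eq, PySem.Str.toList_upper,
    PySem.Dict.get?, hB, List.find?]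
  have e1 : PySem.Chars.upper "NC".toList = ['N','C'] := by decide
  have e2 : PySem.Chars.upper "ND".toList = ['N','D'] := by decide
  have e3 : PySem.Chars.upper "NV".toList = ['N','V'] := by decide
  have e4 : PySem.Chars.upper "NCas_T4".toList = ['N','C'] ++ "AS_T4".toList := by decide
  have e5 : PySem.Chars.upper "NCads_A100".toList = ['N','C'] ++ "ADS_A100".toList := by decide
  have e6 : PySem.Chars.upper "NDs_A100".toList = ['N','D'] ++ "S_A100".toList := by decide
  have e7 : PySem.Chars.upper "NDm_A100".toList = ['N','D'] ++ "M_A100".toList := by decide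
  rw [e1, e2, e3, e4, e5, e6, e7]
  simp only [pv_beq_ofList]
  have f1 : ("NC" : String).toList = ['N','C'] := by decide
  have f2 : ("ND" : String).toList = ['N','D'] := by decide
  have f3 : ("NV" : String).toList = ['N','V'] := by decide
  rw [f1, f2, f3]
  cases hsu : su.toList with
  | nil => simp [PySem.Chars.upper, PySem.Chars.startswith]
  | cons a r =>
    cases r with
    | nil => simp [PySem.Chars.upper, PySem.Chars.startswith]
    | cons b r2 =>
        simp only [PySem.Chars.upper, List.map, List.take]
        by_cases hN : PySem.Chars.upperChar a = 'N'
        · simp only [hN]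
          by_cases hC : PySem.Chars.upperChar b = 'C'
          · simp only [hC]; simp [pv_sw2]
          · by_cases hD : PySem.Chars.upperChar b = 'D'
            · simp only [hD]; simp [pv_sw2]
            · by_cases hV : PySem.Chars.upperChar b = 'V'
              · simp only [hV]; simp [pv_sw2]
              · have k1 : ∀ q, PySem.Chars.startswith
                    ('N' :: PySem.Chars.upperChar b :: List.map PySem.Chars.upperChar r2)
                    (['N','C'] ++ q) = false := by
                  intro q
                  apply Bool.eq_false_iff.mpr; intro hq
                  have := pv_startswith_mono _ _ _ hq
                  rw [pv_sw2] at this; simp at this; exact hC this.symm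
                have k2 : ∀ q, PySem.Chars.startswith
                    ('N' :: PySem.Chars.upperChar b :: List.map PySem.Chars.upperChar r2)
                    (['N','D'] ++ q) = false := by
                  intro q
                  apply Bool.eq_false_iff.mpr; intro hq
                  have := pv_startswith_mono _ _ _ hq
                  rw [pv_sw2] at this; simp at this; exact hD this.symm
                simp only [k1, k2]
                have hC' : ('C' : Char) ≠ PySem.Chars.upperChar b := fun e => hC e.symm
                have hD' : ('D' : Char) ≠ PySem.Chars.upperChar b := fun e => hD e.symm
                have hV' : ('V' : Char) ≠ PySem.Chars.upperChar b := fun e => hV e.symm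
                simp [pv_sw2, beq_eq_false_iff_ne.mpr hC', beq_eq_false_iff_ne.mpr hD', beq_eq_false_iff_ne.mpr hV']
        · have k0 : ∀ q, PySem.Chars.startswith
              (PySem.Chars.upperChar a :: PySem.Chars.upperChar b :: List.map PySem.Chars.upperChar r2)
              ('N' :: q) = false := by
            intro q
            apply Bool.eq_false_iff.mpr; intro hq
            rw [PySem.Chars.startswith, List.isPrefixOf] at hq
            simp at hq
            exact hN hq.1.symm
          simp only [List.cons_append, k0]
          have hN' : ('N' : Char) ≠ PySem.Chars.upperChar a := fun e => hN e.symm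
          simp [beq_eq_false_iff_ne.mpr hN']

-- ===== VERDICT (by name: the statement is the Claim_ definition above) =====
theorem detect_gpu_py_spec : Claim_equal_detect_gpu_py := by
  intro vm_name _
  unfold Spec_detect_gpu_py detect_gpu_py detect_gpu_py_alt
  simp only [pv_split_eq]
  cases h : pvAfterUnderscore vm_name.toList with
  | none =>
      simp only [Option.getD]
      rw [if_neg (by simp)]
      rw [pv_loop_eq_lookup vm_name]
  | some rest =>
      simp only [Option.getD]
      rw [if_pos (by simp)]
      rw [show ([String.ofList (vm_name.toList.takeWhile (fun c => !(c == '_'))),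
            String.ofList rest].getD 1 vm_name) = String.ofList rest from rfl]
      rw [pv_loop_eq_lookup (String.ofList rest)]
      simp
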